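-- pv_equiv track=rewrite | github.com/jungyn/codingtest_prac | 프로그래머스/unrated/181854. 배열의 길이에 따라 다른 연산하기/배열의 길이에 따라 다른 연산하기.py | solution
-- ===== SOURCE A (Python) =====
-- def solution(arr, n):
--     answer = []
--     for idx, val in enumerate(arr):
--         if len(arr) % 2 != 0:
--             if idx % 2 == 0:
--                 val += n
--             answer.append(val)
--         else:
--             if idx % 2 != 0:
--                 val += n
--             answer.append(val)
--     return answer
-- ===== SOURCE B (Python) =====
-- def solution(arr, n):
--     answer = arr[:]
--     start = 0 if len(arr) % 2 != 0 else 1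
--     for i in range(start, len(arr), 2):
--         answer[i] += n
--     return answer
-- ===== Notes on version B (the rewrite author's own statement) =====
-- stated objective: simpler
-- what changed: Instead of rebuilding the list element by element with a per-element length-parity branch, B copies the input and does a single stride-2 in-place update starting at an offset computed once from the length parity.
import Mathlib
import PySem

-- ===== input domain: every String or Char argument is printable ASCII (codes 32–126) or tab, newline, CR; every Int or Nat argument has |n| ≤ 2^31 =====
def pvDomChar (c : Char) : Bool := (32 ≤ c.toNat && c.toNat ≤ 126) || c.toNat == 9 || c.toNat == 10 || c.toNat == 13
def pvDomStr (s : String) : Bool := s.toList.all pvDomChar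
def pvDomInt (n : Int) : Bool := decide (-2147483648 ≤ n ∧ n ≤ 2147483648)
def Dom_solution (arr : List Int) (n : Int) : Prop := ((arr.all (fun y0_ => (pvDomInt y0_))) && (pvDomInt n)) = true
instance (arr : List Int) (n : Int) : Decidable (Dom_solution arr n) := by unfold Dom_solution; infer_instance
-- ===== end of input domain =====

-- B replaces A's per-element length-parity branching append loop by copying the
-- input and doing a stride-2 in-place update starting at an offset computed once
-- from the length parity (objective: simpler).

-- ===== PORT A =====
def solution (arr : List Int) (n : Int) : List Int :=
  (PySem.List.enumerate arr).foldl
    (fun answer p =>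
      if (arr.length : Int) % 2 ≠ 0 then
        answer ++ [if p.1 % 2 = 0 then p.2 + n else p.2]
      else
        answer ++ [if p.1 % 2 ≠ 0 then p.2 + n else p.2])
    []

-- ===== PORT B =====
def solution_alt (arr : List Int) (n : Int) : List Int :=
  let answer := arr
  let start : Int := if (arr.length : Int) % 2 ≠ 0 then 0 else 1
  (PySem.List.pyRange start (arr.length : Int) 2).foldl
    (fun ans i => ans.set i.toNat (PySem.List.pyGetD ans i 0 + n))
    answer

-- ===== PRECONDITION & SPEC =====
def Spec_solution (arr : List Int) (n : Int) (out : List Int) : Prop := out = solution_alt arr n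
instance (arr : List Int) (n : Int) (out : List Int) : Decidable (Spec_solution arr n out) := by unfold Spec_solution; infer_instance

-- ===== CLAIM (what is proved, stated in full; the proofs are below) =====
def Claim_equal_solution : Prop := ∀ (arr : List Int) (n : Int), Dom_solution arr n → Spec_solution arr n (solution arr n)

-- ===== LEMMAS AND PROOFS =====

lemma nodup_pyRange_two (a b : Int) : (PySem.List.pyRange a b 2).Nodup := by
  rw [PySem.List.pyRange_of_pos a b (by norm_num)]
  refine List.Nodup.map ?_ List.nodup_range
  intro k1 k2 h
  simp only [] at h
  omega

lemma foldl_set_getElem? (n : Int) (l : List Int) (ans : List Int)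
    (hnd : l.Nodup) (hb : ∀ i ∈ l, 0 ≤ i ∧ i < (ans.length : Int)) (j : Nat) :
    (l.foldl (fun a i => a.set i.toNat (PySem.List.pyGetD a i 0 + n)) ans)[j]? =
      if (j : Int) ∈ l then (ans[j]?).map (· + n) else ans[j]? := by
  induction l generalizing ans with
  | nil => simp
  | cons i l ih =>
    obtain ⟨hnem, hnd'⟩ := List.nodup_cons.mp hnd
    obtain ⟨hi0, hilt⟩ := hb i (List.mem_cons_self)
    have hlen : (ans.set i.toNat (PySem.List.pyGetD ans i 0 + n)).length = ans.length :=
      List.length_set ..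
    have hb' : ∀ x ∈ l, 0 ≤ x ∧ x < ((ans.set i.toNat (PySem.List.pyGetD ans i 0 + n)).length : Int) := by
      intro x hx; rw [hlen]; exact hb x (List.mem_cons_of_mem _ hx)
    rw [List.foldl_cons, ih _ hnd' hb']
    by_cases hji : (j : Int) = i
    · have hjl : ¬ (j : Int) ∈ l := by rw [hji]; exact hnem
      have hjt : i.toNat = j := by omega
      have hjlt : j < ans.length := by omega
      have hget : PySem.List.pyGetD ans i 0 = ans[j] := by
        rw [PySem.List.pyGetD_eq_getElem ans 0 hi0 hilt]
        congr 1
      rw [if_neg hjl, if_pos (by rw [hji]; exact List.mem_cons_self)]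
      rw [hget, hjt]
      rw [List.getElem?_eq_getElem hjlt]
      simp [hjlt]
    · have hne : i.toNat ≠ j := by omega
      have hset : (ans.set i.toNat (PySem.List.pyGetD ans i 0 + n))[j]? = ans[j]? :=
        List.getElem?_set_ne hne
      have hmc : ((j : Int) ∈ i :: l) ↔ ((j : Int) ∈ l) := by simp [hji]
      rw [hset, if_congr hmc rfl rfl]

lemma foldl_append_map {α β : Type} (g : α → β) :
    ∀ (l : List α) (acc : List β),
      l.foldl (fun a x => a ++ [g x]) acc = acc ++ l.map g := by
  intro l
  induction l with
  | nil => simp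
  | cons x l ih => intro acc; simp [ih]

lemma solution_eq_map (arr : List Int) (n : Int) :
    solution arr n = (PySem.List.enumerate arr).map
      (fun p => if (arr.length : Int) % 2 ≠ 0 then
          (if p.1 % 2 = 0 then p.2 + n else p.2)
        else
          (if p.1 % 2 ≠ 0 then p.2 + n else p.2)) := by
  unfold solution
  have hfun : (fun (answer : List Int) (p : Int × Int) =>
      if (arr.length : Int) % 2 ≠ 0 then
        answer ++ [if p.1 % 2 = 0 then p.2 + n else p.2]
      else
        answer ++ [if p.1 % 2 ≠ 0 then p.2 + n else p.2]) =
      (fun answer p => answer ++ [if (arr.length : Int) % 2 ≠ 0 then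
          (if p.1 % 2 = 0 then p.2 + n else p.2)
        else
          (if p.1 % 2 ≠ 0 then p.2 + n else p.2)]) := by
    funext a p
    by_cases h : (arr.length : Int) % 2 ≠ 0 <;> simp [h]
  rw [hfun, foldl_append_map, List.nil_append]

lemma pyRange_bounds (arr : List Int) :
    ∀ i ∈ PySem.List.pyRange (if (arr.length : Int) % 2 ≠ 0 then 0 else 1) (arr.length : Int) 2,
      0 ≤ i ∧ i < (arr.length : Int) := by
  intro i hi
  rw [PySem.List.mem_pyRange_iff_of_pos (by norm_num)] at hi
  refine ⟨?_, hi.2.1⟩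
  by_cases h : (arr.length : Int) % 2 ≠ 0 <;> simp [h] at hi <;> omega

lemma solution_alt_getElem? (arr : List Int) (n : Int) (j : Nat) :
    (solution_alt arr n)[j]? =
      if (j : Int) ∈ PySem.List.pyRange (if (arr.length : Int) % 2 ≠ 0 then 0 else 1) (arr.length : Int) 2
      then (arr[j]?).map (· + n) else arr[j]? := by
  simp only [solution_alt]
  exact foldl_set_getElem? n _ arr
    (nodup_pyRange_two _ _) (pyRange_bounds arr) j

theorem solution_spec_aux (arr : List Int) (n : Int) :
    solution arr n = solution_alt arr n := by
  apply List.ext_getElem?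
  intro j
  rw [solution_eq_map, List.getElem?_map, PySem.List.getElem?_enumerate,
    solution_alt_getElem?]
  by_cases hjlen : j < arr.length
  · have hjI : (j : Int) < (arr.length : Int) := by exact_mod_cast hjlen
    rw [List.getElem?_eq_getElem hjlen]
    by_cases hpar : (arr.length : Int) % 2 ≠ 0
    · have hmem : ((j : Int) ∈ PySem.List.pyRange (if (arr.length : Int) % 2 ≠ 0 then 0 else 1) (arr.length : Int) 2)
          ↔ ((0 : Int) + (j : Int)) % 2 = 0 := by
        rw [if_pos hpar, PySem.List.mem_pyRange_iff_of_pos (by norm_num)]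
        omega
      by_cases hj2 : ((0 : Int) + (j : Int)) % 2 = 0
      · rw [if_pos (hmem.mpr hj2)]
        simp [hpar]
        omega
      · rw [if_neg (fun h => hj2 (hmem.mp h))]
        simp [hpar]
        omega
    · have hmem : ((j : Int) ∈ PySem.List.pyRange (if (arr.length : Int) % 2 ≠ 0 then 0 else 1) (arr.length : Int) 2)
          ↔ ¬ ((0 : Int) + (j : Int)) % 2 = 0 := by
        rw [if_neg hpar, PySem.List.mem_pyRange_iff_of_pos (by norm_num)]
        omega
      by_cases hj2 : ((0 : Int) + (j : Int)) % 2 = 0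
      · rw [if_neg (fun h => (hmem.mp h) hj2)]
        simp [hpar]
        omega
      · rw [if_pos (hmem.mpr hj2)]
        simp [hpar]
        omega
  · have h1 : arr[j]? = none := List.getElem?_eq_none (by omega)
    have h2 : ¬ ((j : Int) ∈ PySem.List.pyRange (if (arr.length : Int) % 2 ≠ 0 then 0 else 1) (arr.length : Int) 2) := by
      intro hmem
      have := (pyRange_bounds arr _ hmem).2
      omega
    simp [h1]

-- ===== VERDICT (by name: the statement is the Claim_ definition above) =====
theorem solution_spec : Claim_equal_solution := by
  intro arr n _
  exact solution_spec_aux arr n
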